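-- pv_equiv track=rewrite | github.com/zukatech1/Main-Repo | main (1).py | _lua_segments
-- ===== SOURCE A (Python) =====
-- def _lua_segments(code):
--     """
--     Walk through Lua source and yield segments tagged as string/comment/code.
--     Used by rename_variables and encode_strings to avoid touching literal content.
--     """
--     segments = []
--     i = 0
--     n = len(code)
--     while i < n:
--         # Multi-line comment  --[[ ... ]]
--         if code[i:i+4] == '--[[':
--             end = code.find(']]', i + 4)
--             if end == -1:
--                 segments.append({'type': 'comment', 'value': code[i:]})
--                 break
--             segments.append({'type': 'comment', 'value': code[i:end+2]})
--             i = end + 2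
--             continue
--
--         # Single-line comment  -- ...
--         if code[i:i+2] == '--':
--             end = code.find('\n', i)
--             if end == -1:
--                 segments.append({'type': 'comment', 'value': code[i:]})
--                 break
--             segments.append({'type': 'comment', 'value': code[i:end]})
--             i = end
--             continue
--
--         # Multi-line string  [[ ... ]]
--         if code[i:i+2] == '[[':
--             end = code.find(']]', i + 2)
--             if end == -1:
--                 segments.append({'type': 'string', 'value': code[i:], 'raw': code[i:]})
--                 break
--             segments.append({'type': 'string', 'value': code[i:end+2], 'raw': code[i+2:end]})
--             i = end + 2
--             continue
--
--         # Quoted string  "..." or '...'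
--         if code[i] in ('"', "'"):
--             quote = code[i]
--             j = i + 1
--             chars = []
--             while j < n:
--                 if code[j] == '\\' and j + 1 < n:
--                     chars.append(code[j+1])
--                     j += 2
--                     continue
--                 if code[j] == quote:
--                     j += 1
--                     break
--                 chars.append(code[j])
--                 j += 1
--             segments.append({'type': 'string', 'value': code[i:j], 'raw': ''.join(chars)})
--             i = j
--             continue
--
--         # Everything else: accumulate as code
--         if segments and segments[-1]['type'] == 'code':
--             segments[-1]['value'] += code[i]
--         else:
--             segments.append({'type': 'code', 'value': code[i]})
--         i += 1
--
--     return segments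
-- ===== SOURCE B (Python) =====
-- def _special_at(code, i):
--     """Does a special token (comment/long-string/quote) start at position i?"""
--     return code[i:i+2] in ('--', '[[') or code[i] in ('"', "'")
--
--
-- def _take_special(code, i):
--     """Consume the special token starting at i; return (segment tuple, next index)."""
--     n = len(code)
--     if code[i:i+4] == '--[[':
--         end = code.find(']]', i + 4)
--         if end == -1:
--             return ('comment', code[i:]), n
--         return ('comment', code[i:end+2]), end + 2
--     if code[i:i+2] == '--':
--         end = code.find('\n', i)
--         if end == -1:
--             return ('comment', code[i:]), n
--         return ('comment', code[i:end]), end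
--     if code[i:i+2] == '[[':
--         end = code.find(']]', i + 2)
--         if end == -1:
--             return ('string', code[i:], code[i:]), n
--         return ('string', code[i:end+2], code[i+2:end]), end + 2
--     quote = code[i]
--     j = i + 1
--     chars = []
--     while j < n:
--         if code[j] == '\\' and j + 1 < n:
--             chars.append(code[j+1])
--             j += 2
--             continue
--         if code[j] == quote:
--             j += 1
--             break
--         chars.append(code[j])
--         j += 1
--     return ('string', code[i:j], ''.join(chars)), j
--
--
-- def _lua_segments(code):
--     """
--     Two-phase lexer: first cut the source into tagged tuples by alternating a
--     code-run scan with one special-token consumer, then convert tuples to dicts.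
--     """
--     parts = []          # tuples: ('comment', v) | ('string', v, raw) | ('code', v)
--     n = len(code)
--     i = 0
--     while i < n:
--         j = i
--         while j < n and not _special_at(code, j):
--             j += 1
--         if j > i:
--             parts.append(('code', code[i:j]))
--         if j == n:
--             break
--         part, i = _take_special(code, j)
--         parts.append(part)
--
--     segments = []
--     for p in parts:
--         if p[0] == 'string':
--             segments.append({'type': 'string', 'value': p[1], 'raw': p[2]})
--         else:
--             segments.append({'type': p[0], 'value': p[1]})
--     return segments
-- ===== Notes on version B (the rewrite author's own statement) =====
-- stated objective: faster
-- what changed: B is a two-phase lexer: phase 1 alternates one inner code-run scan with a separate special-token consumer helper and collects tagged tuples, phase 2 converts the tuples to dicts; A instead walks char by char in one loop, growing the last code segment's string in place.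
import Mathlib
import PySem

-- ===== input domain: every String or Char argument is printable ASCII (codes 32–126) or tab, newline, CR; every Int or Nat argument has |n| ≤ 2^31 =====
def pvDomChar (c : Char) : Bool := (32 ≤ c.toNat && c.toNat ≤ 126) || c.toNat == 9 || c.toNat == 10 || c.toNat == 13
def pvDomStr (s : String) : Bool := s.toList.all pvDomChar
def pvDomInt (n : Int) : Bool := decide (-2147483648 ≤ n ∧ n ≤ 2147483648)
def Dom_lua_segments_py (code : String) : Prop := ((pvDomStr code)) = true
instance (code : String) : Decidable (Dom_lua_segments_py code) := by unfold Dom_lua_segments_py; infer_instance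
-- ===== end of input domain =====

-- B is a two-phase lexer: an alternation of one code-run scan and one special-token
-- consumer produces tagged tuples, converted to dicts afterwards; A instead walks
-- char by char and grows the last code segment's string in place.  Objective: faster
-- on long code runs (no repeated string re-extension).

-- ===== PORT A =====
-- segments[-1]['value'] += c  (keys distinct, so mapping over the pairs is exact)
def luaAddValue (s : List (String × List Char)) (c : Char) : List (String × List Char) :=
  s.map (fun p => if p.1 = "value" then (p.1, p.2 ++ [c]) else p)

-- the else-branch: append c to the last segment if it is code, else start a new code segment
def luaPushCode (segs : List (List (String × List Char))) (c : Char) :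
    List (List (String × List Char)) :=
  match segs.getLast? with
  | some s =>
      if s.lookup "type" = some "code".toList then segs.dropLast ++ [luaAddValue s c]
      else segs ++ [[("type", "code".toList), ("value", [c])]]
  | none => segs ++ [[("type", "code".toList), ("value", [c])]]

-- inner while of the quoted-string branch: returns (j - (i+1) + consumed closing quote, chars)
def luaQuote (q : Char) : List Char → Nat × List Char
  | [] => (0, [])
  | '\\' :: d :: rest => ((luaQuote q rest).1 + 2, d :: (luaQuote q rest).2)
  | c :: rest =>
      if c = q then (1, [])
      else ((luaQuote q rest).1 + 1, c :: (luaQuote q rest).2)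

-- the while loop of A; fuel = one unit per loop iteration (each iteration consumes ≥ 1 char,
-- so length + 1 fuel is enough).  Python's local 'end' (absolute) is here relative to i:
-- end = i + 4 + find(code[i+4:], ']]'), etc.
def luaLoopA : Nat → List Char → List (List (String × List Char)) →
    List (List (String × List Char))
  | 0, _, segs => segs
  | fuel + 1, cs, segs =>
    match cs with
    | [] => segs
    | c :: rest =>
      if cs.take 4 = "--[[".toList then
        if PySem.Chars.find (cs.drop 4) "]]".toList = -1 then
          segs ++ [[("type", "comment".toList), ("value", cs)]]
        else
          luaLoopA fuel (cs.drop ((PySem.Chars.find (cs.drop 4) "]]".toList).toNat + 4 + 2))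
            (segs ++ [[("type", "comment".toList),
                       ("value", cs.take ((PySem.Chars.find (cs.drop 4) "]]".toList).toNat + 4 + 2))]])
      else if cs.take 2 = "--".toList then
        if PySem.Chars.find cs "\n".toList = -1 then
          segs ++ [[("type", "comment".toList), ("value", cs)]]
        else
          luaLoopA fuel (cs.drop (PySem.Chars.find cs "\n".toList).toNat)
            (segs ++ [[("type", "comment".toList),
                       ("value", cs.take (PySem.Chars.find cs "\n".toList).toNat)]])
      else if cs.take 2 = "[[".toList then
        if PySem.Chars.find (cs.drop 2) "]]".toList = -1 then
          segs ++ [[("type", "string".toList), ("value", cs), ("raw", cs)]]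
        else
          luaLoopA fuel (cs.drop ((PySem.Chars.find (cs.drop 2) "]]".toList).toNat + 2 + 2))
            (segs ++ [[("type", "string".toList),
                       ("value", cs.take ((PySem.Chars.find (cs.drop 2) "]]".toList).toNat + 2 + 2)),
                       ("raw", (cs.drop 2).take (PySem.Chars.find (cs.drop 2) "]]".toList).toNat)]])
      else if c = '"' ∨ c = '\'' then
        luaLoopA fuel (cs.drop ((luaQuote c rest).1 + 1))
          (segs ++ [[("type", "string".toList), ("value", cs.take ((luaQuote c rest).1 + 1)),
                     ("raw", (luaQuote c rest).2)]])
      else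
        luaLoopA fuel rest (luaPushCode segs c)

def lua_segments_py (code : String) : List (List (String × String)) :=
  (luaLoopA (code.toList.length + 1) code.toList []).map
    (fun s => s.map (fun p => (p.1, String.ofList p.2)))

-- ===== PORT B =====
-- B's tagged tuples ('comment', v) | ('string', v, raw) | ('code', v)
inductive LSeg : Type
  | comment : List Char → LSeg
  | lstr : List Char → List Char → LSeg
  | lcode : List Char → LSeg
deriving DecidableEq, Repr

-- phase 2 of B: one tuple becomes one dict
def LSeg.toDict : LSeg → List (String × String)
  | .comment v => [("type", "comment"), ("value", String.ofList v)]
  | .lstr v r => [("type", "string"), ("value", String.ofList v), ("raw", String.ofList r)]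
  | .lcode v => [("type", "code"), ("value", String.ofList v)]

-- _special_at: code[j:j+2] in ('--','[[') or code[j] in ('"',"'")
def luaSpecial (cs : List Char) : Bool :=
  decide (cs.take 2 = ['-', '-'] ∨ cs.take 2 = ['[', '['] ∨
          cs.head? = some '"' ∨ cs.head? = some '\'')

-- B's inner code-run scan: j - i for the first special (or end) position
def luaCodeRun : List Char → Nat
  | [] => 0
  | c :: rest => if luaSpecial (c :: rest) then 0 else luaCodeRun rest + 1

-- B's quoted-string scan, tail-recursive with an accumulator; k counts consumed chars
def luaQuoteB (q : Char) (acc : List Char) (k : Nat) : List Char → List Char × Nat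
  | [] => (acc, k)
  | '\\' :: d :: rest => luaQuoteB q (acc ++ [d]) (k + 2) rest
  | c :: rest => if c = q then (acc, k + 1) else luaQuoteB q (acc ++ [c]) (k + 1) rest

-- code.find(']]', i+k) and code.find('\n', i), relative to the suffix at i
def luaFindCC (cs : List Char) (k : Nat) : Int := PySem.Chars.find (cs.drop k) [']', ']']
def luaFindNL (cs : List Char) : Int := PySem.Chars.find cs ['\n']

-- _take_special on the suffix starting at the special position: (tuple, consumed chars)
def luaTakeSpecial : List Char → LSeg × Nat
  | [] => (LSeg.lcode [], 0)   -- unreachable: the caller only passes a nonempty suffix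
  | c :: rest =>
    if (c :: rest).take 4 = ['-', '-', '[', '['] then
      if luaFindCC (c :: rest) 4 = -1 then
        (LSeg.comment (c :: rest), (c :: rest).length)
      else
        (LSeg.comment ((c :: rest).take ((luaFindCC (c :: rest) 4).toNat + 6)),
         (luaFindCC (c :: rest) 4).toNat + 6)
    else if (c :: rest).take 2 = ['-', '-'] then
      if luaFindNL (c :: rest) = -1 then
        (LSeg.comment (c :: rest), (c :: rest).length)
      else
        (LSeg.comment ((c :: rest).take (luaFindNL (c :: rest)).toNat),
         (luaFindNL (c :: rest)).toNat)
    else if (c :: rest).take 2 = ['[', '['] then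
      if luaFindCC (c :: rest) 2 = -1 then
        (LSeg.lstr (c :: rest) (c :: rest), (c :: rest).length)
      else
        (LSeg.lstr ((c :: rest).take ((luaFindCC (c :: rest) 2).toNat + 4))
           (((c :: rest).drop 2).take (luaFindCC (c :: rest) 2).toNat),
         (luaFindCC (c :: rest) 2).toNat + 4)
    else
      (LSeg.lstr ((c :: rest).take (luaQuoteB c [] 1 rest).2) (luaQuoteB c [] 1 rest).1,
       (luaQuoteB c [] 1 rest).2)

-- phase 1 of B: alternate a code-run scan with one special-token consumption
def luaLoopB : Nat → List Char → List LSeg → List LSeg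
  | 0, _, ls => ls
  | fuel + 1, cs, ls =>
    let r := luaCodeRun cs
    let ls' := if r = 0 then ls else ls ++ [LSeg.lcode (cs.take r)]
    match cs.drop r with
    | [] => ls'
    | d :: ds =>
      let p := luaTakeSpecial (d :: ds)
      luaLoopB fuel ((d :: ds).drop p.2) (ls' ++ [p.1])

def lua_segments_py_alt (code : String) : List (List (String × String)) :=
  (luaLoopB (code.toList.length + 1) code.toList []).map LSeg.toDict

-- ===== PRECONDITION & SPEC =====
def Spec_lua_segments_py (code : String) (out : List (List (String × String))) : Prop := out = lua_segments_py_alt code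
instance (code : String) (out : List (List (String × String))) : Decidable (Spec_lua_segments_py code out) := by unfold Spec_lua_segments_py; infer_instance

-- ===== CLAIM (what is proved, stated in full; the proofs are below) =====
def Claim_equal_lua_segments_py : Prop := ∀ (code : String), Dom_lua_segments_py code → Spec_lua_segments_py code (lua_segments_py code)

-- ===== LEMMAS AND PROOFS =====

-- B's tuples as A's char-level dicts
def LSeg.toPairs : LSeg → List (String × List Char)
  | .comment v => [("type", "comment".toList), ("value", v)]
  | .lstr v r => [("type", "string".toList), ("value", v), ("raw", r)]
  | .lcode v => [("type", "code".toList), ("value", v)]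

theorem toDict_eq_toPairs (sg : LSeg) :
    sg.toDict = sg.toPairs.map (fun p => (p.1, String.ofList p.2)) := by
  cases sg <;> rfl

theorem luaQuoteB_spec (q : Char) : ∀ (rest : List Char) (acc : List Char) (k : Nat),
    luaQuoteB q acc k rest = (acc ++ (luaQuote q rest).2, k + (luaQuote q rest).1) := by
  intro rest
  induction rest using luaQuote.induct q with
  | case1 => intro acc k; simp [luaQuote, luaQuoteB]
  | case2 d rest ih =>
    intro acc k
    rw [luaQuote, luaQuoteB, ih]
    simp; omega
  | case3 tl hno =>
    intro acc k
    cases tl with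
    | nil => simp [luaQuote, luaQuoteB]
    | cons d tl' => simp [luaQuote, luaQuoteB]
  | case4 c rest h hne ih =>
    intro acc k
    simp [luaQuote, luaQuoteB, hne, ih]
    omega

theorem luaCodeRun_le (cs : List Char) : luaCodeRun cs ≤ cs.length := by
  induction cs with
  | nil => simp [luaCodeRun]
  | cons c rest _ =>
    rw [luaCodeRun]; split
    · simp
    · simp only [List.length_cons]; omega

theorem luaCodeRun_stops (cs : List Char) :
    cs.drop (luaCodeRun cs) = [] ∨ luaSpecial (cs.drop (luaCodeRun cs)) = true := by
  induction cs with
  | nil => left; simp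
  | cons c rest ih =>
    rw [luaCodeRun]
    by_cases h : luaSpecial (c :: rest) = true
    · right; simp [h]
    · rw [if_neg h]; simpa using ih

-- a non-special head fails all four of A's branch tests
theorem not_special_branches {c : Char} {rest : List Char}
    (h : luaSpecial (c :: rest) = false) :
    ¬ (c :: rest).take 4 = "--[[".toList ∧ ¬ (c :: rest).take 2 = "--".toList ∧
    ¬ (c :: rest).take 2 = "[[".toList ∧ ¬ (c = '"' ∨ c = '\'') := by
  simp only [luaSpecial, decide_eq_false_iff_not, not_or, List.head?_cons,
    Option.some.injEq] at h
  refine ⟨?_, h.1, h.2.1, fun hc => hc.elim h.2.2.1 h.2.2.2⟩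
  intro h4
  apply h.1
  have h22 : ((c :: rest).take 4).take 2 = (c :: rest).take 2 := by
    rw [List.take_take]; norm_num
  rw [h4] at h22
  exact h22.symm

-- consuming a special token makes progress
theorem luaTakeSpecial_pos (c : Char) (rest : List Char)
    (_h : luaSpecial (c :: rest) = true) : 1 ≤ (luaTakeSpecial (c :: rest)).2 := by
  rw [luaTakeSpecial]
  split_ifs with h1 he1 h2 he2 h3 he3
  · simp
  · simp
  · simp
  · -- terminated single-line comment: the '\n' found cannot be at position 0
    simp only [luaFindNL] at he2 ⊢
    have hf0 : 0 ≤ PySem.Chars.find (c :: rest) ['\n'] := by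
      have := PySem.Chars.neg_one_le_find (s := c :: rest) (sub := ['\n'])
      omega
    rcases Nat.eq_zero_or_pos (PySem.Chars.find (c :: rest) ['\n']).toNat with h0 | hp
    · exfalso
      have hspec := (PySem.Chars.find_spec (s := c :: rest) (sub := ['\n']) hf0).1
      rw [h0] at hspec
      simp only [List.drop_zero] at hspec
      obtain ⟨t, ht⟩ := hspec
      have hc : c = '\n' := by
        have hh : '\n' :: t = c :: rest := by simpa using ht
        exact (List.cons_eq_cons.mp hh).1.symm
      rw [hc] at h2
      simp at h2
    · exact hp
  · simp
  · simp
  · simp only [luaQuoteB_spec]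
    omega

theorem luaTakeSpecial_not_code (c : Char) (rest : List Char) :
    ∀ v, (luaTakeSpecial (c :: rest)).1 ≠ LSeg.lcode v := by
  intro v
  rw [luaTakeSpecial]
  split_ifs <;> simp

-- empty input: A returns its segments at any fuel
theorem luaLoopA_nil (fuel : Nat) (segs : List (List (String × List Char))) :
    luaLoopA fuel [] segs = segs := by
  match fuel with
  | 0 => rfl
  | f + 1 => rfl

-- one special step of A = append the consumed tuple, continue after it
theorem luaLoopA_special (c : Char) (rest : List Char)
    (h : luaSpecial (c :: rest) = true) (a : Nat) (segs : List (List (String × List Char))) :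
    luaLoopA (a + 1) (c :: rest) segs =
      luaLoopA a ((c :: rest).drop (luaTakeSpecial (c :: rest)).2)
        (segs ++ [(luaTakeSpecial (c :: rest)).1.toPairs]) := by
  rw [luaLoopA, luaTakeSpecial]
  simp only [show ("--[[".toList : List Char) = ['-', '-', '[', '['] from rfl,
             show ("--".toList : List Char) = ['-', '-'] from rfl,
             show ("[[".toList : List Char) = ['[', '['] from rfl,
             show ("]]".toList : List Char) = [']', ']'] from rfl,
             show ("\n".toList : List Char) = ['\n'] from rfl,
             luaFindCC, luaFindNL]
  split_ifs with h1 he1 h2 he2 h3 he3 h4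
  · simp [luaLoopA_nil, LSeg.toPairs]
  · have h46 : (PySem.Chars.find ((c :: rest).drop 4) [']', ']']).toNat + 4 + 2 =
        (PySem.Chars.find ((c :: rest).drop 4) [']', ']']).toNat + 6 := by omega
    rw [h46]; simp [LSeg.toPairs]
  · simp [luaLoopA_nil, LSeg.toPairs]
  · simp [LSeg.toPairs]
  · simp [luaLoopA_nil, LSeg.toPairs]
  · have h24 : (PySem.Chars.find ((c :: rest).drop 2) [']', ']']).toNat + 2 + 2 =
        (PySem.Chars.find ((c :: rest).drop 2) [']', ']']).toNat + 4 := by omega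
    rw [h24]; simp [LSeg.toPairs]
  · have hq : 1 + (luaQuote c rest).1 = (luaQuote c rest).1 + 1 := by omega
    simp [luaQuoteB_spec, LSeg.toPairs, hq]
  · exfalso
    simp only [luaSpecial, decide_eq_true_eq, List.head?_cons, Option.some.injEq] at h
    rcases h with h | h | h | h
    · exact h2 h
    · exact h3 h
    · exact h4 (Or.inl h)
    · exact h4 (Or.inr h)

-- A consumes a whole code run one character at a time, extending the last (code) segment
theorem luaLoopA_run (cs : List Char) : ∀ (fuel : Nat) (segs : List (List (String × List Char)))
    (v : List Char), cs.length < fuel →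
    luaLoopA fuel cs (segs ++ [[("type", "code".toList), ("value", v)]]) =
      luaLoopA (fuel - luaCodeRun cs) (cs.drop (luaCodeRun cs))
        (segs ++ [[("type", "code".toList), ("value", v ++ cs.take (luaCodeRun cs))]]) := by
  induction cs with
  | nil => intro fuel segs v _; simp [luaCodeRun]
  | cons c rest ih =>
    intro fuel segs v hf
    by_cases hs : luaSpecial (c :: rest) = true
    · rw [luaCodeRun, if_pos hs]; simp
    · have hs' : luaSpecial (c :: rest) = false := by simpa using hs
      obtain ⟨h1, h2, h3, h4⟩ := not_special_branches hs'
      obtain ⟨f, rfl⟩ : ∃ f, fuel = f + 1 := ⟨fuel - 1, by omega⟩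
      rw [luaLoopA, if_neg h1, if_neg h2, if_neg h3, if_neg h4]
      have hpush : luaPushCode (segs ++ [[("type", "code".toList), ("value", v)]]) c =
          segs ++ [[("type", "code".toList), ("value", v ++ [c])]] := by
        simp [luaPushCode, luaAddValue, List.getLast?_append, Option.some_or]
      rw [hpush, ih f segs (v ++ [c]) (by simp at hf; omega)]
      rw [luaCodeRun, if_neg (by simp [hs'])]
      have hfr : f + 1 - (luaCodeRun rest + 1) = f - luaCodeRun rest := by omega
      rw [hfr]
      simp

-- the main equivalence: A's char-walk equals B's alternation, for any sufficient fuels,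
-- provided the last accumulated segment is not a code segment when a code run starts
-- the type of the last accumulated segment, seen through toPairs
theorem toPairs_lookup_ne (sg : LSeg) (hsg : ∀ v, sg ≠ LSeg.lcode v) :
    (LSeg.toPairs sg).lookup "type" ≠ some "code".toList := by
  cases sg with
  | comment v => simp [LSeg.toPairs]
  | lstr v r => simp [LSeg.toPairs]
  | lcode v => exact absurd rfl (hsg v)

theorem luaLoop_eq (N : Nat) : ∀ (cs : List Char) (fa fb : Nat) (ls : List LSeg),
    cs.length < fa → cs.length < fb → fa ≤ N →
    (luaSpecial cs = false → ∀ v, ls.getLast? ≠ some (LSeg.lcode v)) →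
    luaLoopA fa cs (ls.map LSeg.toPairs) = (luaLoopB fb cs ls).map LSeg.toPairs := by
  induction N with
  | zero => intro cs fa fb ls hfa _ hN _; omega
  | succ N ih =>
    intro cs fa fb ls hfa hfb hN hlast
    obtain ⟨a, rfl⟩ : ∃ a, fa = a + 1 := ⟨fa - 1, by omega⟩
    obtain ⟨b, rfl⟩ : ∃ b, fb = b + 1 := ⟨fb - 1, by omega⟩
    match cs with
    | [] => simp [luaLoopA, luaLoopB, luaCodeRun]
    | c :: rest =>
      by_cases hs : luaSpecial (c :: rest) = true
      · -- the suffix starts a special token: B consumes it at once, A in one branch step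
        have hr : luaCodeRun (c :: rest) = 0 := by rw [luaCodeRun, if_pos hs]
        have hk := luaTakeSpecial_pos c rest hs
        rw [luaLoopA_special c rest hs a]
        simp only [luaLoopB, hr, List.drop_zero]
        have hstep := ih ((c :: rest).drop (luaTakeSpecial (c :: rest)).2) a b
          (ls ++ [(luaTakeSpecial (c :: rest)).1])
          (by simp only [List.length_drop, List.length_cons] at hfa ⊢; omega)
          (by simp only [List.length_drop, List.length_cons] at hfb ⊢; omega)
          (by omega)
          (by intro _ v hsome
              simp only [List.getLast?_append, List.getLast?_singleton, Option.some_or,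
                Option.some.injEq] at hsome
              exact luaTakeSpecial_not_code c rest v hsome)
        simp only [List.map_append, List.map_cons, List.map_nil] at hstep
        exact hstep
      · -- a code run: A walks it char by char, B slices it and then takes one special token
        have hs' : luaSpecial (c :: rest) = false := by simpa using hs
        obtain ⟨h1, h2, h3, h4⟩ := not_special_branches hs'
        have hr : luaCodeRun (c :: rest) = luaCodeRun rest + 1 := by
          rw [luaCodeRun, if_neg (by simp [hs'])]
        rw [luaLoopA, if_neg h1, if_neg h2, if_neg h3, if_neg h4]
        have hpush : luaPushCode (ls.map LSeg.toPairs) c =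
            ls.map LSeg.toPairs ++ [[("type", "code".toList), ("value", [c])]] := by
          unfold luaPushCode
          rcases hsome : (ls.map LSeg.toPairs).getLast? with _ | s
          · rfl
          · show (if List.lookup "type" s = some "code".toList then
                (ls.map LSeg.toPairs).dropLast ++ [luaAddValue s c]
              else ls.map LSeg.toPairs ++ [[("type", "code".toList), ("value", [c])]]) =
              ls.map LSeg.toPairs ++ [[("type", "code".toList), ("value", [c])]]
            rw [List.getLast?_map] at hsome
            rcases hlg : ls.getLast? with _ | sg
            · rw [hlg] at hsome; simp at hsome
            · rw [hlg] at hsome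
              simp only [Option.map_some, Option.some.injEq] at hsome
              rw [if_neg (hsome ▸ toPairs_lookup_ne sg
                (fun v hv => hlast hs' v (hlg.trans (by rw [hv]))))]
        rw [hpush, luaLoopA_run rest a _ [c] (by simp only [List.length_cons] at hfa; omega)]
        have hrle := luaCodeRun_le rest
        simp only [List.singleton_append]
        simp only [luaLoopB, hr]
        rw [if_neg (by omega)]
        simp only [List.take_succ_cons, List.drop_succ_cons]
        rcases hsp : rest.drop (luaCodeRun rest) with _ | ⟨d, ds⟩
        · -- the code run reaches the end of the input
          rw [luaLoopA_nil]
          simp [LSeg.toPairs]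
        · -- the code run stops at a special token; A takes one more branch step
          have hdss : luaSpecial (d :: ds) = true := by
            rcases luaCodeRun_stops rest with hnil | hspec
            · rw [hsp] at hnil; simp at hnil
            · rw [hsp] at hspec; exact hspec
          have hlen : ds.length + 1 = rest.length - luaCodeRun rest := by
            have := congrArg List.length hsp
            simp only [List.length_drop, List.length_cons] at this
            omega
          obtain ⟨a2, ha2⟩ : ∃ a2, a - luaCodeRun rest = a2 + 1 :=
            ⟨a - luaCodeRun rest - 1, by simp only [List.length_cons] at hfa; omega⟩
          rw [ha2, luaLoopA_special d ds hdss a2]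
          have hk := luaTakeSpecial_pos d ds hdss
          have hstep := ih ((d :: ds).drop (luaTakeSpecial (d :: ds)).2) a2 b
            (ls ++ [LSeg.lcode (c :: rest.take (luaCodeRun rest)), (luaTakeSpecial (d :: ds)).1])
            (by simp only [List.length_drop, List.length_cons] at *; omega)
            (by simp only [List.length_drop, List.length_cons] at hfb ⊢; omega)
            (by omega)
            (by intro _ v hsome
                simp only [List.getLast?_append] at hsome
                simp only [List.getLast?_cons, Option.some_or] at hsome
                simp only [Option.some.injEq] at hsome
                exact luaTakeSpecial_not_code d ds v hsome)
          simp only [List.map_append, List.map_cons, List.map_nil] at hstep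
          simp only [LSeg.toPairs] at hstep
          simp only [List.append_assoc, List.cons_append, List.nil_append] at hstep ⊢
          exact hstep

-- ===== VERDICT (by name: the statement is the Claim_ definition above) =====
theorem lua_segments_py_spec : Claim_equal_lua_segments_py := by
  intro code _
  unfold Spec_lua_segments_py lua_segments_py lua_segments_py_alt
  have h := luaLoop_eq (code.toList.length + 1) code.toList (code.toList.length + 1)
    (code.toList.length + 1) [] (by omega) (by omega) (by omega) (by intro _ v h; simp at h)
  simp only [List.map_nil] at h
  rw [h, List.map_map]
  exact List.map_congr_left fun sg _ => (toDict_eq_toPairs sg).symm
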